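-- pv_equiv track=rewrite | github.com/machops/ecosystem | backend/ai/engines/folding/vector_folding.py | _chunk_log
-- ===== SOURCE A (Python) =====
-- def _chunk_log(content: str) -> list[str]:
--     """Chunk log files by timestamp boundaries, grouping ~50 lines."""
--     lines = content.split("\n")
--     chunk_size = 50
--     chunks = []
--     for i in range(0, len(lines), chunk_size):
--         chunk = "\n".join(lines[i : i + chunk_size]).strip()
--         if chunk:
--             chunks.append(chunk)
--     return chunks if chunks else [content]
-- ===== SOURCE B (Python) =====
-- def _flush(buffer, chunks):
--     chunk = "\n".join(buffer).strip()
--     if chunk: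
--         chunks.append(chunk)
--     return chunks
--
--
-- def _chunk_log(content: str) -> list[str]:
--     """Chunk log files by timestamp boundaries, grouping ~50 lines."""
--     chunks = []
--     buffer = []
--     for line in content.split("\n"):
--         buffer.append(line)
--         if len(buffer) == 50:
--             chunks = _flush(buffer, chunks)
--             buffer = []
--     chunks = _flush(buffer, chunks)
--     return chunks if chunks else [content]
-- ===== Notes on version B (the rewrite author's own statement) =====
-- stated objective: alternative
-- what changed: Replaced the strided index loop with slicing lines[i:i+50] by a single accumulate-and-flush pass over the lines, joining and emitting a buffer each time it reaches 50 lines and flushing the remainder at the end.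
import Mathlib
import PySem

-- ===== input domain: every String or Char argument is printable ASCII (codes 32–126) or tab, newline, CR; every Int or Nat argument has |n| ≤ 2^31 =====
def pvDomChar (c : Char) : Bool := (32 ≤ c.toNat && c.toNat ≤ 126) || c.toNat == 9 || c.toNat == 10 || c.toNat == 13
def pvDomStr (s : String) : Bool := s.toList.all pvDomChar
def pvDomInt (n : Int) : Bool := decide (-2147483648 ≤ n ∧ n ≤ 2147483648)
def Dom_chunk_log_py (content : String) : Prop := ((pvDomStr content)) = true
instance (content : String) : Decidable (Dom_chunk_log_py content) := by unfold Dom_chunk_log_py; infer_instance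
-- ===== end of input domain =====

-- B replaces A's strided index/slice loop by a single accumulate-and-flush pass over the lines (alternative decomposition, same cost).

-- ===== PORT A =====
def chunk_log_py (content : String) : List String :=
  let lines : List String := (PySem.Str.split? content "\n").getD []
  let chunks : List String :=
    (PySem.List.pyRange 0 (lines.length : Int) 50).foldl
      (fun chunks i =>
        if PySem.Str.strip (PySem.Str.join "\n" (PySem.List.slice lines (some i) (some (i + 50)))) ≠ "" then
          chunks ++ [PySem.Str.strip (PySem.Str.join "\n" (PySem.List.slice lines (some i) (some (i + 50))))]
        else chunks)
      []
  if chunks = [] then [content] else chunks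

-- ===== PORT B =====
-- helper _flush of Source B
def bflush (buffer : List String) (chunks : List String) : List String :=
  let chunk := PySem.Str.strip (PySem.Str.join "\n" buffer)
  if chunk ≠ "" then chunks ++ [chunk] else chunks

-- the 'for line in lines' loop of Source B, as structural recursion over the lines
def bloop : List String → List String → List String → List String
  | [], buffer, chunks => bflush buffer chunks
  | l :: rest, buffer, chunks =>
    if (buffer ++ [l]).length = 50 then bloop rest [] (bflush (buffer ++ [l]) chunks)
    else bloop rest (buffer ++ [l]) chunks

def chunk_log_py_alt (content : String) : List String :=
  let lines : List String := (PySem.Str.split? content "\n").getD []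
  let chunks : List String := bloop lines [] []
  if chunks = [] then [content] else chunks

-- ===== PRECONDITION & SPEC =====
def Spec_chunk_log_py (content : String) (out : List String) : Prop := out = chunk_log_py_alt content
instance (content : String) (out : List String) : Decidable (Spec_chunk_log_py content out) := by unfold Spec_chunk_log_py; infer_instance

-- ===== CLAIM (what is proved, stated in full; the proofs are below) =====
def Claim_equal_chunk_log_py : Prop := ∀ (content : String), Dom_chunk_log_py content → Spec_chunk_log_py content (chunk_log_py content)

-- ===== LEMMAS AND PROOFS =====

-- the chunk that one ≤50-line block contributes (proof-only common spec)
def flushIf (buffer : List String) : List String :=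
  if PySem.Str.strip (PySem.Str.join "\n" buffer) ≠ "" then
    [PySem.Str.strip (PySem.Str.join "\n" buffer)]
  else []

-- common characterisation of the chunk list both loops build
def chunksOf (ls : List String) : List String :=
  if _h : ls = [] then []
  else flushIf (ls.take 50) ++ chunksOf (ls.drop 50)
termination_by ls.length
decreasing_by
  have : 0 < ls.length := List.length_pos_iff.mpr _h
  simp [List.length_drop]; omega

lemma bflush_eq (buffer chunks : List String) : bflush buffer chunks = chunks ++ flushIf buffer := by
  by_cases h : PySem.Str.strip (PySem.Str.join "\n" buffer) ≠ "" <;>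
    simp [bflush, flushIf, h]

lemma flushIf_nil : flushIf [] = [] := by decide

lemma bloop_eq : ∀ (ls buffer chunks : List String), buffer.length < 50 →
    bloop ls buffer chunks = chunks ++ chunksOf (buffer ++ ls) := by
  intro ls
  induction ls with
  | nil =>
    intro buffer chunks h
    simp only [bloop]
    rw [bflush_eq, List.append_nil]
    by_cases hb : buffer = []
    · subst hb; rw [chunksOf]; simp [flushIf_nil]
    · rw [chunksOf, dif_neg hb]
      rw [List.take_of_length_le (by omega), List.drop_eq_nil_of_le (by omega), chunksOf]
      simp
  | cons l rest ih =>
    intro buffer chunks h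
    simp only [bloop]
    by_cases h50 : (buffer ++ [l]).length = 50
    · rw [if_pos h50, ih [] _ (by simp), bflush_eq]
      rw [show buffer ++ l :: rest = (buffer ++ [l]) ++ rest by simp]
      conv_rhs => rw [chunksOf]
      rw [dif_neg (by simp)]
      rw [List.take_left' h50, List.drop_left' h50]
      simp
    · rw [if_neg h50, ih (buffer ++ [l]) chunks (by simp at h50 ⊢; omega)]
      simp

-- pyRange with step 50, specialised to this file's loop: empty, cons and shift forms
lemma pyRange50_nonpos (b : Int) (hb : b ≤ 0) : PySem.List.pyRange 0 b 50 = [] := by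
  rw [PySem.List.pyRange_of_pos _ _ (by norm_num), if_neg (by omega)]
  rfl

lemma pyRange50_cons (b : Int) (hb : 0 < b) :
    PySem.List.pyRange 0 b 50 = 0 :: PySem.List.pyRange 50 b 50 := by
  rw [PySem.List.pyRange_of_pos _ _ (by norm_num), PySem.List.pyRange_of_pos _ _ (by norm_num)]
  rw [if_pos (by omega : (0:Int) < b)]
  by_cases h50 : 50 < b
  · rw [if_pos h50]
    have hc : ((b - 0 + 50 - 1) / 50).toNat = ((b - 50 + 50 - 1) / 50).toNat + 1 := by omega
    rw [hc, List.range_succ_eq_map]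
    simp [List.map_map, Function.comp]
    intro a _
    ring
  · rw [if_neg h50]
    have hc : ((b - 0 + 50 - 1) / 50).toNat = 1 := by omega
    rw [hc]
    simp
lemma pyRange50_shift (b : Int) :
    PySem.List.pyRange 50 b 50 = (PySem.List.pyRange 0 (b - 50) 50).map (· + 50) := by
  rw [PySem.List.pyRange_of_pos _ _ (by norm_num), PySem.List.pyRange_of_pos _ _ (by norm_num)]
  by_cases hb : 50 < b
  · rw [if_pos hb, if_pos (by omega)]
    have hc : ((b - 50 + 50 - 1) / 50).toNat = ((b - 50 - 0 + 50 - 1) / 50).toNat := by omega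
    rw [hc, List.map_map]
    simp [Function.comp]
    intro a _
    ring
  · rw [if_neg hb, if_neg (by omega)]
    simp

lemma slice_shift (ls : List String) (i : Int) (hi : 0 ≤ i) :
    PySem.List.slice ls (some (i + 50)) (some (i + 50 + 50)) =
      PySem.List.slice (ls.drop 50) (some i) (some (i + 50)) := by
  rw [PySem.List.slice_toNat _ (by omega) (by omega), PySem.List.slice_toNat _ hi (by omega)]
  have h1 : (i + 50).toNat = i.toNat + 50 := by omega
  have h2 : (i + 50 + 50).toNat - (i + 50).toNat = 50 := by omega
  have h3 : (i + 50).toNat - i.toNat = 50 := by omega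
  rw [h2, h3, h1, List.drop_drop, Nat.add_comm]

lemma slice_head (ls : List String) :
    PySem.List.slice ls (some (0:Int)) (some ((0:Int) + 50)) = ls.take 50 := by
  have h : (0:Int) + 50 = 50 := by norm_num
  rw [h, PySem.List.slice_zero_start, PySem.List.slice_to _ (by norm_num)]
  rfl

lemma afold_eq : ∀ (n : Nat) (ls : List String), ls.length = n → ∀ (acc : List String),
    (PySem.List.pyRange 0 (ls.length : Int) 50).foldl
      (fun chunks i =>
        if PySem.Str.strip (PySem.Str.join "\n" (PySem.List.slice ls (some i) (some (i + 50)))) ≠ "" then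
          chunks ++ [PySem.Str.strip (PySem.Str.join "\n" (PySem.List.slice ls (some i) (some (i + 50))))]
        else chunks)
      acc = acc ++ chunksOf ls := by
  intro n
  induction n using Nat.strong_induction_on with
  | _ n IH =>
    intro ls hlen acc
    by_cases hnil : ls = []
    · subst hnil
      rw [chunksOf]
      simp [pyRange50_nonpos 0 (by norm_num)]
    · have hpos : 0 < ls.length := List.length_pos_iff.mpr hnil
      rw [pyRange50_cons _ (by exact_mod_cast hpos), List.foldl_cons]
      rw [pyRange50_shift, List.foldl_map]
      have hcg := PySem.List.foldl_congr_mem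
        (l := PySem.List.pyRange 0 ((ls.length : Int) - 50) 50)
        (init := if PySem.Str.strip (PySem.Str.join "\n" (PySem.List.slice ls (some 0) (some (0 + 50)))) ≠ "" then
            acc ++ [PySem.Str.strip (PySem.Str.join "\n" (PySem.List.slice ls (some 0) (some (0 + 50))))]
          else acc)
        (f := fun chunks i =>
          if PySem.Str.strip (PySem.Str.join "\n" (PySem.List.slice ls (some (i + 50)) (some (i + 50 + 50)))) ≠ "" then
            chunks ++ [PySem.Str.strip (PySem.Str.join "\n" (PySem.List.slice ls (some (i + 50)) (some (i + 50 + 50))))]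
          else chunks)
        (g := fun chunks i =>
          if PySem.Str.strip (PySem.Str.join "\n" (PySem.List.slice (ls.drop 50) (some i) (some (i + 50)))) ≠ "" then
            chunks ++ [PySem.Str.strip (PySem.Str.join "\n" (PySem.List.slice (ls.drop 50) (some i) (some (i + 50))))]
          else chunks)
        (by
          intro acc' i hi
          have hi0 : 0 ≤ i := by
            rw [PySem.List.pyRange_of_pos _ _ (by norm_num)] at hi
            obtain ⟨k, _, rfl⟩ := List.mem_map.mp hi
            positivity
          simp only [slice_shift ls i hi0])
      rw [hcg]
      have hr : PySem.List.pyRange 0 ((ls.length : Int) - 50) 50 =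
          PySem.List.pyRange 0 (((ls.drop 50).length : Int)) 50 := by
        by_cases h50 : 50 ≤ ls.length
        · congr 1
          simp [List.length_drop]
          omega
        · rw [pyRange50_nonpos _ (by omega), pyRange50_nonpos _ (by simp; omega)]
      rw [hr, IH (ls.drop 50).length (by simp [List.length_drop]; omega) (ls.drop 50) rfl]
      rw [slice_head]
      conv_rhs => rw [chunksOf]
      rw [dif_neg hnil]
      by_cases hc : PySem.Str.strip (PySem.Str.join "\n" (ls.take 50)) ≠ "" <;>
        simp [flushIf, hc]

-- ===== VERDICT (by name: the statement is the Claim_ definition above) =====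
theorem chunk_log_py_spec : Claim_equal_chunk_log_py := by
  intro content _
  simp only [Spec_chunk_log_py, chunk_log_py, chunk_log_py_alt]
  rw [afold_eq ((PySem.Str.split? content "\n").getD []).length _ rfl,
    bloop_eq _ _ _ (by norm_num)]
  simp
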